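-- pv_equiv track=rewrite | github.com/Supersonicsoundwave/EGE26 | task-5/21243.py | f
-- ===== SOURCE A (Python) =====
-- def conv(x, q):
--     res = ''
--     while x:
--         res += str(x % q)
--         x //= q
--     return res[::-1]
--
-- def f(n):
--     r = conv(n, 5)
--     if sum(int(i) for i in r) % 5 == 0:
--         r = r.replace('0', '*')
--         r = r.replace('1', '0')
--         r = r.replace('*', '1')
--         r += '14'
--     else:
--         r += '33'
--         r = '44' + r[2:]
--     return int(r, 5)
-- ===== SOURCE B (Python) =====
-- def f(n):
--     # One LSB-first arithmetic pass: accumulate digit sum s, power p = 5**numdigits,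
--     # and t = value of n with base-5 digits 0 and 1 swapped (built positionally).
--     # Then both branches are closed arithmetic forms: the swap-branch is t*25+9
--     # (append digits 1,4); the other branch's "prepend 44, drop top two digits,
--     # append 33" equals 24*p + (25*n + 18) % p, since appending 33 then dropping
--     # the two leading digits of the (len+2)-digit number is a mod by p = 5**len.
--     s = 0
--     p = 1
--     t = 0
--     x = n
--     while x:
--         d = x % 5
--         s += d
--         t += (1 - d if d < 2 else d) * p
--         p *= 5
--         x //= 5
--     if s % 5 == 0:
--         return t * 25 + 9
--     return 24 * p + (25 * n + 18) % p
-- ===== Notes on version B (the rewrite author's own statement) =====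
-- stated objective: alternative
-- what changed: Replaces A's MSB string pipeline (build base-5 string, three .replace passes, slicing, int(r,5) reparse) by one LSB-first arithmetic pass that accumulates digit sum, 5**len and the 0/1-swapped value positionally, and computes the non-swap branch by the closed modular formula 24*p + (25*n+18) % p instead of any string or list surgery.
import Mathlib
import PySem

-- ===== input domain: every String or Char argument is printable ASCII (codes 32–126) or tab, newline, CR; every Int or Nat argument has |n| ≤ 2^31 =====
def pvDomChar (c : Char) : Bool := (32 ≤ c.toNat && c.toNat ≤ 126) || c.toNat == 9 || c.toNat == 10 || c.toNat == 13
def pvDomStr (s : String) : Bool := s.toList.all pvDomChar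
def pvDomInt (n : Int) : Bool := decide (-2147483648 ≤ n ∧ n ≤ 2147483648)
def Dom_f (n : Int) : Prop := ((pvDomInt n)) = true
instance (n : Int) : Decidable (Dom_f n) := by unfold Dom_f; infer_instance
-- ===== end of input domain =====

-- B replaces A's base-5 STRING pipeline (build string MSB-first, three .replace
-- passes, '44'+slice, int(r,5) reparse) by ONE LSB-first arithmetic pass that
-- accumulates the digit sum, p = 5^numdigits and the 0/1-swapped value
-- positionally; the non-swap branch becomes the closed form 24*p + (25*n+18) % p.

-- ===== PORT A =====
-- conv's `while x:` loop; the `x ≤ 0 ∨ q ≤ 1` stop condition only totalizes the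
-- definition (Python stops at x = 0 and never returns for x < 0 or q ≤ 1; f only
-- calls q = 5, and Pre_f excludes n < 0).
def convLoop (q : Int) (x : Int) (res : String) : String :=
  if x ≤ 0 ∨ q ≤ 1 then res
  else convLoop q (PySem.Int.floordiv x q) (res ++ PySem.Int.toStr (PySem.Int.mod x q))
termination_by x.toNat
decreasing_by
  have hx : x = ((x.toNat : Nat) : Int) := by omega
  have hq : q = ((q.toNat : Nat) : Int) := by omega
  rw [hx, hq, PySem.Int.floordiv_natCast]
  simp only [Int.toNat_natCast]
  exact Nat.div_lt_self (by omega) (by omega)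

def conv (x q : Int) : String :=
  -- res[::-1]
  (PySem.Str.slice? (convLoop q x "") none none (-1)).getD ""

def f (n : Int) : Int :=
  let r := conv n 5
  -- sum(int(i) for i in r): int(i) via PySem.Int.ofStr?; every i is a digit so it never raises
  if PySem.Int.mod (r.toList.foldl (fun s c => s + (PySem.Int.ofStr? (String.singleton c)).getD 0) 0) 5 = 0 then
    let r1 := PySem.Str.replace r "0" "*"
    let r2 := PySem.Str.replace r1 "1" "0"
    let r3 := PySem.Str.replace r2 "*" "1"
    let r4 := r3 ++ "14"
    -- int(r, 5) ported by hand, exact here: r4 is a non-empty string of digits '0'..'4'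
    r4.toList.foldl (fun acc c => acc * 5 + ((c.toNat : Int) - 48)) 0
  else
    let r1 := r ++ "33"
    let r2 := "44" ++ PySem.Str.slice r1 (some 2) none
    -- int(r, 5) ported by hand, exact here: r2 is a non-empty string of digits '0'..'4'
    r2.toList.foldl (fun acc c => acc * 5 + ((c.toNat : Int) - 48)) 0

-- ===== PORT B =====
-- B's `while x:` pass over the base-5 digits, LSB first, carrying (s, p, t);
-- the `x ≤ 0` stop condition only totalizes (Python stops at x = 0 and never
-- returns for x < 0, which Pre_f excludes).
def altLoop (x s p t : Int) : Int × Int × Int :=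
  if x ≤ 0 then (s, p, t)
  else
    let d := PySem.Int.mod x 5
    altLoop (PySem.Int.floordiv x 5) (s + d) (p * 5) (t + (if d < 2 then 1 - d else d) * p)
termination_by x.toNat
decreasing_by
  all_goals
    have h5 : PySem.Int.floordiv x 5 = x / 5 := PySem.Int.floordiv_eq_ediv_of_pos (by norm_num)
    omega

def f_alt (n : Int) : Int :=
  let r := altLoop n 0 1 0
  if PySem.Int.mod r.1 5 = 0 then r.2.2 * 25 + 9
  else 24 * r.2.1 + PySem.Int.mod (25 * n + 18) r.2.1

-- ===== PRECONDITION & SPEC =====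
-- Pre_f excludes n < 0, where A's `while x:` loop never terminates (x //= 5 stalls
-- at -1), so A returns no value there (B diverges there too).
def Pre_f (n : Int) : Prop := 0 ≤ n
instance (n : Int) : Decidable (Pre_f n) := by unfold Pre_f; infer_instance
def pvWitness_f : Int := 10

def Spec_f (n : Int) (out : Int) : Prop := out = f_alt n
instance (n : Int) (out : Int) : Decidable (Spec_f n out) := by unfold Spec_f; infer_instance

-- ===== CLAIM (what is proved, stated in full; the proofs are below) =====
def Claim_equal_f : Prop := ∀ (n : Int), Dom_f n → Pre_f n → Spec_f n (f n)

-- ===== LEMMAS AND PROOFS =====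

-- proof-side skeleton of A's digit production: the LSB-first list of base-5 digits
def digitsLoop (x : Int) (ds : List Int) : List Int :=
  if x ≤ 0 then ds
  else digitsLoop (PySem.Int.floordiv x 5) (ds ++ [PySem.Int.mod x 5])
termination_by x.toNat
decreasing_by
  all_goals
    have h5 : PySem.Int.floordiv x 5 = x / 5 := PySem.Int.floordiv_eq_ediv_of_pos (by norm_num)
    omega

def swapd (d : Int) : Int := if d < 2 then 1 - d else d

def digitChar (d : Int) : Char := Char.ofNat (48 + d.toNat)

def polyLSB (ds : List Int) : Int := ds.foldr (fun d acc => d + 5 * acc) 0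

theorem mod5_cases (x : Int) : PySem.Int.mod x 5 = 0 ∨ PySem.Int.mod x 5 = 1 ∨
    PySem.Int.mod x 5 = 2 ∨ PySem.Int.mod x 5 = 3 ∨ PySem.Int.mod x 5 = 4 := by
  rw [PySem.Int.mod_eq_emod_of_pos (by norm_num)]
  omega

theorem digitsLoop_nonpos (x : Int) (ds : List Int) (h : x ≤ 0) :
    digitsLoop x ds = ds := by
  rw [digitsLoop]; simp [h]

theorem digitsLoop_pos (x : Int) (ds : List Int) (h : ¬ x ≤ 0) :
    digitsLoop x ds = digitsLoop (PySem.Int.floordiv x 5) (ds ++ [PySem.Int.mod x 5]) := by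
  conv_lhs => rw [digitsLoop]
  rw [if_neg h]

theorem digitsLoop_acc (x : Int) (ds : List Int) :
    digitsLoop x ds = ds ++ digitsLoop x [] := by
  by_cases h : x ≤ 0
  · rw [digitsLoop_nonpos x ds h, digitsLoop_nonpos x [] h]; simp
  · rw [digitsLoop_pos x ds h, digitsLoop_pos x [] h]
    rw [digitsLoop_acc (PySem.Int.floordiv x 5) (ds ++ [PySem.Int.mod x 5]),
        digitsLoop_acc (PySem.Int.floordiv x 5) ([] ++ [PySem.Int.mod x 5])]
    simp
termination_by x.toNat
decreasing_by
  all_goals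
    have h5 : PySem.Int.floordiv x 5 = x / 5 := PySem.Int.floordiv_eq_ediv_of_pos (by norm_num)
    omega

theorem digitsLoop_cons (x : Int) (h : ¬ x ≤ 0) :
    digitsLoop x [] = PySem.Int.mod x 5 :: digitsLoop (PySem.Int.floordiv x 5) [] := by
  rw [digitsLoop_pos x [] h, digitsLoop_acc]; simp

theorem digitsLoop_bounds (x : Int) : ∀ d ∈ digitsLoop x [], 0 ≤ d ∧ d < 5 := by
  by_cases h : x ≤ 0
  · rw [digitsLoop_nonpos x [] h]; simp
  · rw [digitsLoop_cons x h]
    intro d hd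
    rcases List.mem_cons.mp hd with hd | hd
    · subst hd
      rcases mod5_cases x with h0 | h0 | h0 | h0 | h0 <;> rw [h0] <;> omega
    · exact digitsLoop_bounds (PySem.Int.floordiv x 5) d hd
termination_by x.toNat
decreasing_by
  all_goals
    have h5 : PySem.Int.floordiv x 5 = x / 5 := PySem.Int.floordiv_eq_ediv_of_pos (by norm_num)
    omega

theorem digitsLoop_value (x : Int) (h0 : 0 ≤ x) : polyLSB (digitsLoop x []) = x := by
  by_cases h : x ≤ 0
  · rw [digitsLoop_nonpos x [] h]
    simp only [polyLSB, List.foldr_nil]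
    omega
  · rw [digitsLoop_cons x h]
    have h5 : PySem.Int.floordiv x 5 = x / 5 := PySem.Int.floordiv_eq_ediv_of_pos (by norm_num)
    have hm : PySem.Int.mod x 5 = x % 5 := PySem.Int.mod_eq_emod_of_pos (by norm_num)
    have ih := digitsLoop_value (PySem.Int.floordiv x 5) (by rw [h5]; omega)
    simp only [polyLSB, List.foldr_cons] at ih ⊢
    rw [ih, h5, hm]
    omega
termination_by x.toNat
decreasing_by
  all_goals omega

theorem toChars_digit (m : Int) (h : 0 ≤ m ∧ m < 5) :
    PySem.Int.toChars m = [digitChar m] := by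
  have : m = 0 ∨ m = 1 ∨ m = 2 ∨ m = 3 ∨ m = 4 := by omega
  rcases this with h0 | h0 | h0 | h0 | h0 <;> subst h0 <;> decide

theorem convLoop_eq (x : Int) (s : String) :
    (convLoop 5 x s).toList = s.toList ++ (digitsLoop x []).map digitChar := by
  by_cases h : x ≤ 0
  · rw [convLoop, digitsLoop_nonpos x [] h]
    simp [h]
  · have h' : ¬(x ≤ 0 ∨ (5:Int) ≤ 1) := by omega
    conv_lhs => rw [convLoop]
    rw [if_neg h', digitsLoop_cons x h]
    rw [convLoop_eq (PySem.Int.floordiv x 5) _]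
    have hm : 0 ≤ PySem.Int.mod x 5 ∧ PySem.Int.mod x 5 < 5 := by
      rcases mod5_cases x with h0 | h0 | h0 | h0 | h0 <;> rw [h0] <;> omega
    rw [String.toList_append, PySem.Int.toList_toStr, toChars_digit _ hm]
    simp
termination_by x.toNat
decreasing_by
  all_goals
    have h5 : PySem.Int.floordiv x 5 = x / 5 := PySem.Int.floordiv_eq_ediv_of_pos (by norm_num)
    omega

theorem conv_eq (x : Int) :
    (conv x 5).toList = ((digitsLoop x []).reverse).map digitChar := by
  rw [conv, PySem.Str.slice?_none_none_neg_one]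
  simp [convLoop_eq, List.map_reverse]

theorem sum_map_digitChar (ds : List Int) (h : ∀ d ∈ ds, 0 ≤ d ∧ d < 5) (a : Int) :
    (ds.map digitChar).foldl (fun s c => s + (PySem.Int.ofStr? (String.singleton c)).getD 0) a
      = ds.foldl (· + ·) a := by
  induction ds generalizing a with
  | nil => rfl
  | cons d t ih =>
    simp only [List.map_cons, List.foldl_cons]
    have hd := h d (List.mem_cons_self ..)
    have hv : (PySem.Int.ofStr? (String.singleton (digitChar d))).getD 0 = d := by
      have : d = 0 ∨ d = 1 ∨ d = 2 ∨ d = 3 ∨ d = 4 := by omega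
      rcases this with h0 | h0 | h0 | h0 | h0 <;> subst h0 <;> decide
    rw [hv]
    exact ih (fun e he => h e (List.mem_cons_of_mem _ he)) (a + d)

theorem horner_map (ds : List Int) (h : ∀ d ∈ ds, 0 ≤ d ∧ d < 5) (a : Int) :
    (ds.map digitChar).foldl (fun acc c => acc * 5 + ((c.toNat : Int) - 48)) a
      = ds.foldl (fun v d => v * 5 + d) a := by
  induction ds generalizing a with
  | nil => rfl
  | cons d t ih =>
    simp only [List.map_cons, List.foldl_cons]
    have hd := h d (List.mem_cons_self ..)
    have hv : (((digitChar d).toNat : Int) - 48) = d := by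
      have : d = 0 ∨ d = 1 ∨ d = 2 ∨ d = 3 ∨ d = 4 := by omega
      rcases this with h0 | h0 | h0 | h0 | h0 <;> subst h0 <;> decide
    rw [hv]
    exact ih (fun e he => h e (List.mem_cons_of_mem _ he)) _

theorem replace_go_single (o n' : Char) (fuel : Nat) :
    ∀ (l acc : List Char), l.length ≤ fuel →
    PySem.Chars.replace.go [o] [n'] fuel l acc
      = acc.reverse ++ l.map (fun c => if c = o then n' else c) := by
  induction fuel with
  | zero =>
    intro l acc h
    have hl : l = [] := by cases l <;> simp_all
    subst hl
    simp [PySem.Chars.replace.go]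
  | succ k ih =>
    intro l acc h
    cases l with
    | nil => simp [PySem.Chars.replace.go]
    | cons c t =>
      rw [PySem.Chars.replace.go]
      by_cases hc : c = o
      · subst hc
        have hpre : [c].isPrefixOf (c :: t) = true := by simp [List.isPrefixOf]
        simp only [hpre, if_true]
        rw [ih _ _ (by simpa using Nat.le_of_succ_le_succ h)]
        simp
      · have hpre : [o].isPrefixOf (c :: t) = false := by
          simp [List.isPrefixOf]
          exact fun hco => absurd hco.symm hc
        simp only [hpre, Bool.false_eq_true, if_false]
        rw [ih _ _ (by simpa using Nat.le_of_succ_le_succ h)]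
        simp [hc]

theorem replace_single (cs : List Char) (o n' : Char) :
    PySem.Chars.replace cs [o] [n'] = cs.map (fun c => if c = o then n' else c) := by
  rw [PySem.Chars.replace]
  simp only [List.isEmpty_cons, Bool.false_eq_true, if_false]
  exact replace_go_single o n' cs.length cs [] (le_refl _)

theorem swap_digitChar (d : Int) (h : 0 ≤ d ∧ d < 5) :
    (fun c => if c = '*' then '1' else c)
      ((fun c => if c = '1' then '0' else c)
        ((fun c => if c = '0' then '*' else c) (digitChar d)))
      = digitChar (swapd d) := by
  have : d = 0 ∨ d = 1 ∨ d = 2 ∨ d = 3 ∨ d = 4 := by omega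
  rcases this with h0 | h0 | h0 | h0 | h0 <;> subst h0 <;> decide

theorem horner_shift (l : List Int) (a : Int) :
    l.foldl (fun v d => v * 5 + d) a
      = a * 5 ^ l.length + l.foldl (fun v d => v * 5 + d) 0 := by
  induction l generalizing a with
  | nil => simp
  | cons d t ih =>
    simp only [List.foldl_cons, List.length_cons]
    rw [ih (a * 5 + d), ih (0 * 5 + d)]
    ring

theorem horner_reverse (l : List Int) :
    l.reverse.foldl (fun v d => v * 5 + d) 0 = polyLSB l := by
  induction l with
  | nil => rfl
  | cons d t ih =>
    simp only [List.reverse_cons, List.foldl_append, ih, List.foldl_cons,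
      List.foldl_nil, polyLSB, List.foldr_cons]
    show polyLSB t * 5 + d = d + 5 * polyLSB t
    ring

theorem horner_bounds (l : List Int) (h : ∀ d ∈ l, 0 ≤ d ∧ d < 5) :
    0 ≤ l.foldl (fun v d => v * 5 + d) 0 ∧
      l.foldl (fun v d => v * 5 + d) 0 < 5 ^ l.length := by
  induction l with
  | nil => simp
  | cons d t ih =>
    obtain ⟨h0, h1⟩ := h d (List.mem_cons_self ..)
    obtain ⟨ih0, ih1⟩ := ih (fun e he => h e (List.mem_cons_of_mem _ he))
    have hp : (0:Int) < 5 ^ t.length := by positivity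
    simp only [List.foldl_cons, List.length_cons]
    rw [horner_shift]
    constructor
    · nlinarith
    · have h5 : (5:Int) ^ (t.length + 1) = 5 * 5 ^ t.length := by ring
      rw [h5]; nlinarith

theorem altLoop_eq (x s p t : Int) :
    altLoop x s p t
      = (s + (digitsLoop x []).sum, p * 5 ^ (digitsLoop x []).length,
         t + p * polyLSB ((digitsLoop x []).map swapd)) := by
  by_cases h : x ≤ 0
  · rw [altLoop, digitsLoop_nonpos x [] h]
    simp [h, polyLSB]
  · rw [altLoop, if_neg h]
    rw [altLoop_eq (PySem.Int.floordiv x 5), digitsLoop_cons x h]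
    simp only [List.sum_cons, List.length_cons, List.map_cons, polyLSB, List.foldr_cons]
    refine Prod.ext ?_ (Prod.ext ?_ ?_) <;> simp only [swapd] <;> ring
termination_by x.toNat
decreasing_by
  all_goals
    have h5 : PySem.Int.floordiv x 5 = x / 5 := PySem.Int.floordiv_eq_ediv_of_pos (by norm_num)
    omega

theorem foldl_add_sum (l : List Int) : l.foldl (· + ·) 0 = l.sum := by
  simpa using PySem.List.foldl_add (l := l) (a := 0) (g := id)

-- ===== VERDICT (by name: the statement is the Claim_ definition above) =====
theorem f_spec : Claim_equal_f := by
  unfold Claim_equal_f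
  intro n _ hpre
  unfold Pre_f at hpre
  unfold Spec_f f f_alt
  have hb := digitsLoop_bounds n
  set L := digitsLoop n [] with hL
  have hbr : ∀ d ∈ L.reverse, 0 ≤ d ∧ d < 5 := fun d hd => hb d (List.mem_reverse.mp hd)
  have hr : (conv n 5).toList = L.reverse.map digitChar := conv_eq n
  rw [altLoop_eq]
  simp only [hr, sum_map_digitChar L.reverse hbr 0, foldl_add_sum, List.sum_reverse,
    zero_add, one_mul]
  split_ifs with hc
  · -- swap branch: A's edited string value = polyLSB (L.map swapd) * 25 + 9
    have h1 : (PySem.Str.replace (conv n 5) "0" "*").toList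
        = (L.reverse.map digitChar).map (fun c => if c = '0' then '*' else c) := by
      simp [PySem.Str.toList_replace, hr, replace_single]
    have h2 : (PySem.Str.replace (PySem.Str.replace (conv n 5) "0" "*") "1" "0").toList
        = ((L.reverse.map digitChar).map (fun c => if c = '0' then '*' else c)).map
            (fun c => if c = '1' then '0' else c) := by
      simp [PySem.Str.toList_replace, h1, replace_single]
    have h3 : (PySem.Str.replace (PySem.Str.replace (PySem.Str.replace (conv n 5) "0" "*") "1" "0") "*" "1").toList
        = (L.reverse.map swapd).map digitChar := by
      simp only [PySem.Str.toList_replace, h2, List.map_map]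
      rw [show "*".toList = ['*'] by decide, show "1".toList = ['1'] by decide]
      rw [replace_single, List.map_map]
      refine List.map_congr_left (fun d hd => ?_)
      simpa using swap_digitChar d (hbr d hd)
    have h4 : (PySem.Str.replace (PySem.Str.replace (PySem.Str.replace (conv n 5) "0" "*") "1" "0") "*" "1" ++ "14").toList
        = (L.reverse.map swapd ++ [1, 4]).map digitChar := by
      simp [h3, digitChar]
    have hswb : ∀ d ∈ L.reverse.map swapd ++ [1, 4], 0 ≤ d ∧ d < 5 := by
      intro d hd
      rcases List.mem_append.mp hd with hd | hd
      · rcases List.mem_map.mp hd with ⟨e, he, rfl⟩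
        have := hbr e he
        simp only [swapd]
        constructor <;> split_ifs <;> omega
      · simp at hd; rcases hd with h0 | h0 <;> omega
    rw [h4, horner_map _ hswb]
    rw [List.foldl_append, List.map_reverse, horner_reverse, ← hL]
    simp only [List.foldl_cons, List.foldl_nil]
    ring
  · -- non-swap branch: A's '44'+slice value = 24 * 5^|L| + (25n+18) % 5^|L|
    have h1 : (conv n 5 ++ "33").toList = ((L.reverse ++ [3, 3]).map digitChar) := by
      simp [hr, digitChar]
    have hsl : ∀ (xs : List Int), PySem.List.slice (xs.map digitChar) (some 2) none
        = (PySem.List.slice xs (some 2) none).map digitChar := by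
      intro xs
      rw [PySem.List.slice_from _ (by norm_num : (0:Int) ≤ 2),
          PySem.List.slice_from _ (by norm_num : (0:Int) ≤ 2)]
      simp
    have h2 : ("44" ++ PySem.Str.slice (conv n 5 ++ "33") (some 2) none).toList
        = (([4, 4] ++ PySem.List.slice (L.reverse ++ [3, 3]) (some 2) none).map digitChar) := by
      have h1' : (conv n 5).toList ++ "33".toList = List.map digitChar (L.reverse ++ [3, 3]) := by
        simpa using h1
      simp only [String.toList_append, PySem.Str.toList_slice]
      rw [show PySem.Chars.slice ((conv n 5).toList ++ "33".toList) (some 2) none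
            = PySem.List.slice ((conv n 5).toList ++ "33".toList) (some 2) none from rfl,
          h1', hsl]
      simp [digitChar]
    have hM : ∀ d ∈ L.reverse ++ [3, 3], 0 ≤ d ∧ d < 5 := by
      intro d hd
      rcases List.mem_append.mp hd with hd | hd
      · exact hbr d hd
      · simp at hd; omega
    have hall : ∀ d ∈ ([4, 4] ++ PySem.List.slice (L.reverse ++ [3, 3]) (some 2) none : List Int),
        0 ≤ d ∧ d < 5 := by
      intro d hd
      rcases List.mem_append.mp hd with hd | hd
      · simp at hd; omega
      · exact hM d (PySem.List.mem_of_mem_slice _ _ _ hd)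
    rw [h2, horner_map _ hall]
    rw [PySem.List.slice_from _ (by norm_num : (0:Int) ≤ 2)]
    -- split [4,4] prefix
    rw [List.foldl_append]
    simp only [List.foldl_cons, List.foldl_nil]
    set M := L.reverse ++ [3, 3] with hMdef
    set R := M.drop (Int.toNat 2) with hRdef
    have hlenM : M.length = L.length + 2 := by simp [hMdef]
    have hlenR : R.length = L.length := by
      rw [hRdef, List.length_drop, hlenM]; rfl
    have hRb : ∀ d ∈ R, 0 ≤ d ∧ d < 5 := fun d hd => hM d (List.mem_of_mem_drop hd)
    have hRbounds := horner_bounds R hRb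
    have hp : (0:Int) < 5 ^ L.length := by positivity
    -- value of the whole M
    have hvalL : L.reverse.foldl (fun v d => v * 5 + d) 0 = n := by
      rw [horner_reverse, hL, digitsLoop_value n hpre]
    have hMval : M.foldl (fun v d => v * 5 + d) 0 = 25 * n + 18 := by
      rw [hMdef, List.foldl_append, hvalL]
      simp only [List.foldl_cons, List.foldl_nil]
      ring
    -- split M into take 2 ++ R
    have hsplit : M = M.take (Int.toNat 2) ++ R := (List.take_append_drop _ M).symm
    have hMval2 : M.foldl (fun v d => v * 5 + d) 0
        = (M.take (Int.toNat 2)).foldl (fun v d => v * 5 + d) 0 * 5 ^ L.length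
          + R.foldl (fun v d => v * 5 + d) 0 := by
      conv_lhs => rw [hsplit]
      rw [List.foldl_append, horner_shift, hlenR]
    have hmodeq : PySem.Int.mod (25 * n + 18) (5 ^ L.length)
        = R.foldl (fun v d => v * 5 + d) 0 := by
      rw [PySem.Int.mod_eq_emod_of_pos hp]
      have : 25 * n + 18 = R.foldl (fun v d => v * 5 + d) 0
          + 5 ^ L.length * (M.take (Int.toNat 2)).foldl (fun v d => v * 5 + d) 0 := by
        rw [← hMval, hMval2]; ring
      have hlt : R.foldl (fun v d => v * 5 + d) 0 < 5 ^ L.length := by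
        rw [← hlenR]; exact hRbounds.2
      rw [this, Int.add_mul_emod_self_left, Int.emod_eq_of_lt hRbounds.1 hlt]
    rw [horner_shift R, hlenR, hmodeq]
    ring
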